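-- pv_equiv track=rewrite | github.com/dohaahi/Programmers | 프로그래머스/unrated/181855. 문자열 묶기/문자열 묶기.py | solution
-- ===== SOURCE A (Python) =====
-- def solution(strArr):
--     my_dict = {}
--
--     arr_map = list(map(lambda s: len(s), strArr))
--
--     for i in arr_map:
--         if my_dict.get(i) is not None:
--             my_dict[i] += 1
--             continue
--         my_dict[i] = 1
--
--     return max(sorted(my_dict.values(),  reverse=True))
-- ===== SOURCE B (Python) =====
-- def solution(strArr):
--     lengths = sorted(len(s) for s in strArr)
--     best = 0
--     run = 0
--     prev = None
--     for x in lengths: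
--         run = run + 1 if x == prev else 1
--         prev = x
--         best = max(best, run)
--     return best
-- ===== Notes on version B (the rewrite author's own statement) =====
-- stated objective: alternative
-- what changed: replaces the dict-of-counts plus sorted(values) with a single run-length scan over the sorted list of string lengths, tracking the longest run of equal lengths
import Mathlib
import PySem

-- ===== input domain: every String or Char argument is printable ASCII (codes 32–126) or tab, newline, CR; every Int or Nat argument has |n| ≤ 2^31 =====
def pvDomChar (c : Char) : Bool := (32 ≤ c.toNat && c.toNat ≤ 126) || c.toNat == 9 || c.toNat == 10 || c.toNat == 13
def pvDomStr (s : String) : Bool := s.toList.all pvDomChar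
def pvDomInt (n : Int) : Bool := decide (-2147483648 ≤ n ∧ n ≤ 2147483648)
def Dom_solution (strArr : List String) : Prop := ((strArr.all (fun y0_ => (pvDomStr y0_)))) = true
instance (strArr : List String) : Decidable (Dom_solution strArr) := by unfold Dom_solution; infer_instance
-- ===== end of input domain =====

-- B replaces A's dict of counts + sorted(values) with a run-length scan of the sorted
-- lengths; same value on every nonempty input, equivalence of the return value proved below.

-- ===== PORT A =====
def solution (strArr : List String) : Int :=
  let arr_map := strArr.map (fun s => PySem.Str.len s)
  let my_dict := arr_map.foldl (fun (d : PySem.Dict Int Int) i =>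
      match d.get? i with
      | some v => d.insert i (v + 1)
      | none   => d.insert i 1) PySem.Dict.empty
  -- max(...) raises on an empty dict: excluded by Pre_solution; .getD 0 is never read inside Pre_
  ((PySem.List.max? (PySem.List.sorted my_dict.values (fun v => v) true) (fun v => v)).getD 0)

-- ===== PORT B =====
def solution_alt (strArr : List String) : Int :=
  let lengths := PySem.List.sorted (strArr.map (fun s => PySem.Str.len s)) (fun v => v) false
  let r := lengths.foldl (fun (st : Int × Int × Option Int) x =>
      let run : Int := if some x == st.2.2 then st.2.1 + 1 else 1
      (max st.1 run, run, some x)) ((0 : Int), (0 : Int), (none : Option Int))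
  r.1

-- ===== PRECONDITION & SPEC =====
-- Pre_ excludes only the empty list, on which A's max() raises ValueError.
def Pre_solution (strArr : List String) : Prop := strArr ≠ []
instance (strArr : List String) : Decidable (Pre_solution strArr) := by unfold Pre_solution; infer_instance
def pvWitness_solution : List String := (["a", "bb", "cc"])

def Spec_solution (strArr : List String) (out : Int) : Prop := out = solution_alt strArr
instance (strArr : List String) (out : Int) : Decidable (Spec_solution strArr out) := by unfold Spec_solution; infer_instance

-- ===== CLAIM (what is proved, stated in full; the proofs are below) =====
def Claim_equal_solution : Prop := ∀ (strArr : List String), Dom_solution strArr → Pre_solution strArr → Spec_solution strArr (solution strArr)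

-- ===== LEMMAS AND PROOFS =====

/-- max of a list of Ints, floored at 0 -/
def maxOf (m : List Int) : Int := m.foldl max 0

theorem foldl_max_comm (m : List Int) : ∀ a b : Int, m.foldl max (max a b) = max a (m.foldl max b) := by
  induction m with
  | nil => intro a b; simp
  | cons c t ih =>
    intro a b
    simp only [List.foldl_cons, max_assoc]
    exact ih a (max b c)

theorem maxOf_cons (a : Int) (m : List Int) : maxOf (a :: m) = max a (maxOf m) := by
  simp only [maxOf, List.foldl_cons]
  rw [max_comm 0 a, foldl_max_comm]

theorem maxOf_nonneg (m : List Int) : 0 ≤ maxOf m := by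
  induction m with
  | nil => simp [maxOf]
  | cons a t ih => rw [maxOf_cons]; omega

theorem le_maxOf_of_mem {a : Int} {m : List Int} (h : a ∈ m) : a ≤ maxOf m := by
  induction m with
  | nil => simp at h
  | cons b t ih =>
    rw [maxOf_cons]
    rcases List.mem_cons.mp h with h | h
    · omega
    · have := ih h; omega

theorem maxOf_le {m : List Int} {b : Int} (hb : 0 ≤ b) (h : ∀ a ∈ m, a ≤ b) : maxOf m ≤ b := by
  induction m with
  | nil => simpa [maxOf]
  | cons a t ih =>
    rw [maxOf_cons]
    have h1 := h a (List.mem_cons_self)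
    have h2 := ih (fun x hx => h x (List.mem_cons_of_mem _ hx))
    omega

theorem maxOf_congr {m m' : List Int} (h : ∀ z, z ∈ m ↔ z ∈ m') : maxOf m = maxOf m' := by
  apply le_antisymm
  · exact maxOf_le (maxOf_nonneg m') (fun a ha => le_maxOf_of_mem ((h a).mp ha))
  · exact maxOf_le (maxOf_nonneg m) (fun a ha => le_maxOf_of_mem ((h a).mpr ha))

/-- B's scan step -/
def bStep (st : Int × Int × Option Int) (x : Int) : Int × Int × Option Int :=
  let run : Int := if some x == st.2.2 then st.2.1 + 1 else 1
  (max st.1 run, run, some x)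

/-- invariant of B's run-length scan over a sorted tail -/
theorem scan_inv : ∀ (l : List Int) (best run p : Int),
    l.Pairwise (· ≤ ·) → (∀ y ∈ l, p ≤ y) → run ≤ best → 0 ≤ run →
    (l.foldl bStep (best, run, some p)).1
      = max best (maxOf (l.map (fun k => if k = p then run + (l.count k : Int) else (l.count k : Int)))) := by
  intro l
  induction l with
  | nil =>
    intro best run p _ _ hrb hr
    simp only [List.foldl_nil, List.map_nil]
    simp [maxOf]; omega
  | cons x t ih =>
    intro best run p hpw hge hrb hr
    have hpw' : t.Pairwise (· ≤ ·) := (List.pairwise_cons.mp hpw).2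
    have hxt : ∀ y ∈ t, x ≤ y := (List.pairwise_cons.mp hpw).1
    have hpx : p ≤ x := hge x List.mem_cons_self
    by_cases hxp : x = p
    · subst hxp
      have hstep : bStep (best, run, some x) x = (max best (run + 1), run + 1, some x) := by
        simp [bStep]
      rw [List.foldl_cons, hstep,
          ih (max best (run + 1)) (run + 1) x hpw' hxt (le_max_right _ _) (by omega)]
      have hmap : t.map (fun k => if k = x then run + ((x :: t).count k : Int) else ((x :: t).count k : Int))
          = t.map (fun k => if k = x then (run + 1) + (t.count k : Int) else (t.count k : Int)) := by
        apply List.map_congr_left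
        intro k _
        by_cases hk : k = x
        · subst hk; simp [List.count_cons_self]; ring
        · rw [if_neg hk, if_neg hk]; simp [List.count_cons]; omega
      rw [List.map_cons, hmap, if_pos rfl, List.count_cons_self, maxOf_cons]
      have hc : (0 : Int) ≤ (t.count x : Int) := by positivity
      have hkey : run + 1 + (t.count x : Int)
          ≤ max (run + 1) (maxOf (t.map (fun k => if k = x then (run + 1) + (t.count k : Int) else (t.count k : Int)))) := by
        rcases Nat.eq_zero_or_pos (t.count x) with h0 | h0
        · simp [h0]
        · have hxmem : x ∈ t := List.count_pos_iff.mp h0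
          have : ((run + 1) + (t.count x : Int)) ∈ t.map (fun k => if k = x then (run + 1) + (t.count k : Int) else (t.count k : Int)) := by
            exact List.mem_map.mpr ⟨x, hxmem, by simp⟩
          have := le_maxOf_of_mem this
          omega
      push_cast
      omega
    · have hpxlt : p < x := lt_of_le_of_ne hpx (fun h => hxp h.symm)
      have hstep : bStep (best, run, some p) x = (max best 1, 1, some x) := by
        simp [bStep, fun h : x = p => hxp h]
      rw [List.foldl_cons, hstep,
          ih (max best 1) 1 x hpw' hxt (le_max_right _ _) (by omega)]
      have hnotp : ∀ k ∈ x :: t, k ≠ p := by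
        intro k hk
        rcases List.mem_cons.mp hk with h | h
        · subst h; exact hxp
        · exact fun he => absurd (hxt k h) (by subst he; omega)
      have hmap : (x :: t).map (fun k => if k = p then run + ((x :: t).count k : Int) else ((x :: t).count k : Int))
          = (x :: t).map (fun k => if k = x then 1 + (t.count k : Int) else (t.count k : Int)) := by
        apply List.map_congr_left
        intro k hk
        rw [if_neg (hnotp k hk)]
        by_cases hkx : k = x
        · subst hkx; simp [List.count_cons_self]; ring
        · rw [if_neg hkx]; simp [List.count_cons]; omega
      rw [hmap, List.map_cons, if_pos rfl, maxOf_cons]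
      have hkey : 1 + (t.count x : Int)
          ≤ max 1 (maxOf (t.map (fun k => if k = x then 1 + (t.count k : Int) else (t.count k : Int)))) := by
        rcases Nat.eq_zero_or_pos (t.count x) with h0 | h0
        · simp [h0]
        · have hxmem : x ∈ t := List.count_pos_iff.mp h0
          have : ((1 : Int) + (t.count x : Int)) ∈ t.map (fun k => if k = x then 1 + (t.count k : Int) else (t.count k : Int)) := by
            exact List.mem_map.mpr ⟨x, hxmem, by simp⟩
          have := le_maxOf_of_mem this
          omega
      omega

/-- canonical value: max over elements k of L of count of k in L (0 for []) -/
def M (L : List Int) : Int := maxOf (L.map (fun k => (L.count k : Int)))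

theorem solution_eq_M (strArr : List String) (h : strArr ≠ []) :
    solution strArr = M (strArr.map (fun s => PySem.Str.len s)) := by
  unfold solution
  set L := strArr.map (fun s => PySem.Str.len s) with hL
  have hstep : (fun (d : PySem.Dict Int Int) i =>
      match d.get? i with
      | some v => d.insert i (v + 1)
      | none   => d.insert i 1) = (fun (d : PySem.Dict Int Int) i => d.insert i (d.getD i 0 + 1)) := by
    funext d i
    cases hg : d.get? i with
    | none => simp [PySem.Dict.getD_eq_get?_getD, hg]
    | some v => simp [PySem.Dict.getD_eq_get?_getD, hg]
  rw [hstep]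
  dsimp only
  rw [PySem.Dict.foldl_insert_getD_add_one_eq_counter]
  have hvals : (PySem.Dict.counter L).values = (PySem.Set.ofList L).map (fun k => (L.count k : Int)) := by
    show ((PySem.Dict.counter L).items.map (·.2)) = _
    rw [PySem.Dict.items_counter]
    simp [List.map_map, Function.comp]
  rw [hvals]
  set vals := (PySem.Set.ofList L).map (fun k => (L.count k : Int)) with hvalsdef
  have hLne : L ≠ [] := by
    intro hc; rw [hL] at hc; exact h (List.map_eq_nil_iff.mp hc)
  have hvalsne : vals ≠ [] := by
    intro hc; rw [hvalsdef] at hc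
    have hnil := List.map_eq_nil_iff.mp hc
    obtain ⟨a, tl, hcons⟩ := List.exists_cons_of_ne_nil hLne
    have ha : a ∈ PySem.Set.ofList L := (PySem.Set.mem_ofList _ _).mpr (by rw [hcons]; exact List.mem_cons_self)
    rw [hnil] at ha
    simp at ha
  have hsortne : PySem.List.sorted vals (fun v => v) true ≠ [] := by
    simpa [PySem.List.sorted_eq_nil_iff] using hvalsne
  obtain ⟨v, t, hvt⟩ := List.exists_cons_of_ne_nil hsortne
  rw [hvt, PySem.List.max?_id_cons, Option.getD_some]
  -- foldl max v t = maxOf (v :: t)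
  have hv_mem : v ∈ vals := by
    rw [← PySem.List.mem_sorted (key := fun v => v) (rev := true), hvt]; exact List.mem_cons_self
  have hv_pos : 0 ≤ v := by
    obtain ⟨k, _, hk⟩ := List.mem_map.mp hv_mem
    subst hk; positivity
  have hfold : t.foldl max v = maxOf (v :: t) := by
    rw [maxOf_cons]
    show _ = max v (t.foldl max 0)
    rw [← foldl_max_comm, max_eq_left hv_pos]
  rw [hfold]
  have h1 : maxOf (v :: t) = maxOf vals := by
    apply maxOf_congr
    intro z
    rw [← hvt, PySem.List.mem_sorted]
  rw [h1]
  apply maxOf_congr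
  intro z
  constructor
  · intro hz
    obtain ⟨k, hk, hkz⟩ := List.mem_map.mp hz
    exact List.mem_map.mpr ⟨k, (PySem.Set.mem_ofList _ _).mp hk, hkz⟩
  · intro hz
    obtain ⟨k, hk, hkz⟩ := List.mem_map.mp hz
    exact List.mem_map.mpr ⟨k, (PySem.Set.mem_ofList _ _).mpr hk, hkz⟩

theorem solution_alt_eq_M (strArr : List String) (h : strArr ≠ []) :
    solution_alt strArr = M (strArr.map (fun s => PySem.Str.len s)) := by
  unfold solution_alt
  set L := strArr.map (fun s => PySem.Str.len s) with hL
  have hLne : L ≠ [] := by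
    simp [hL, List.map_eq_nil_iff, h]
  set S := PySem.List.sorted L (fun v => v) false with hS
  have hSne : S ≠ [] := by simpa [hS, PySem.List.sorted_eq_nil_iff] using hLne
  obtain ⟨x, t, hxt⟩ := List.exists_cons_of_ne_nil hSne
  have hperm : S.Perm L := PySem.List.sorted_perm _ _ _
  have hpw : S.Pairwise (· ≤ ·) := by
    simpa using PySem.List.sorted_pairwise (xs := L) (key := fun v => v)
  show (S.foldl bStep (0, 0, none)).1 = M L
  rw [hxt]
  have hstep0 : bStep (0, 0, none) x = (1, 1, some x) := by
    simp [bStep]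
  have hpw' : t.Pairwise (· ≤ ·) := by rw [hxt] at hpw; exact (List.pairwise_cons.mp hpw).2
  have hxt' : ∀ y ∈ t, x ≤ y := by rw [hxt] at hpw; exact (List.pairwise_cons.mp hpw).1
  rw [List.foldl_cons, hstep0, scan_inv t 1 1 x hpw' hxt' le_rfl (by omega)]
  -- relate to M L via M S
  have hMS : M S = M L := by
    unfold M
    apply maxOf_congr
    intro z
    constructor
    · intro hz
      obtain ⟨k, hk, hkz⟩ := List.mem_map.mp hz
      exact List.mem_map.mpr ⟨k, hperm.mem_iff.mp hk, by rw [← hkz, hperm.count_eq]⟩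
    · intro hz
      obtain ⟨k, hk, hkz⟩ := List.mem_map.mp hz
      exact List.mem_map.mpr ⟨k, hperm.mem_iff.mpr hk, by rw [← hkz, hperm.count_eq]⟩
  rw [← hMS]
  unfold M
  rw [hxt, List.map_cons, maxOf_cons, List.count_cons_self]
  have hmap : t.map (fun k => ((x :: t).count k : Int))
      = t.map (fun k => if k = x then 1 + (t.count k : Int) else (t.count k : Int)) := by
    apply List.map_congr_left
    intro k _
    by_cases hk : k = x
    · subst hk; simp [List.count_cons_self]; ring
    · rw [if_neg hk]; simp [List.count_cons]; omega
  rw [hmap]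
  have hmap2 : t.map (fun k => if k = x then 1 + ((t.count k : Nat) : Int) else ((t.count k : Nat) : Int))
      = t.map (fun k => if k = x then (1 : Int) + (t.count k : Int) else (t.count k : Int)) := rfl
  have hkey : 1 + (t.count x : Int)
      ≤ max 1 (maxOf (t.map (fun k => if k = x then (1 : Int) + (t.count k : Int) else (t.count k : Int)))) := by
    rcases Nat.eq_zero_or_pos (t.count x) with h0 | h0
    · simp [h0]
    · have hxmem : x ∈ t := List.count_pos_iff.mp h0
      have : ((1 : Int) + (t.count x : Int)) ∈ t.map (fun k => if k = x then (1 : Int) + (t.count k : Int) else (t.count k : Int)) :=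
        List.mem_map.mpr ⟨x, hxmem, by simp⟩
      have := le_maxOf_of_mem this
      omega
  push_cast
  omega

-- ===== VERDICT (by name: the statement is the Claim_ definition above) =====
theorem solution_spec : Claim_equal_solution := by
  intro strArr _ hpre
  unfold Spec_solution
  rw [solution_eq_M strArr hpre, solution_alt_eq_M strArr hpre]
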